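-- pv_equiv track=rewrite | github.com/aguslugea/SINTAXIS_TP_1 | lexer.py | automata_entonces
-- ===== SOURCE A (Python) =====
-- ESTADO_TRAMPA = "TRAMPA"
--
-- ESTADO_FINAL = "ACEPTADO"
--
-- ESTADO_NO_FINAL = "NO ACEPTADO"
--
-- def condicion_cadena(estado_actual1, estados_finaless):
--
--     if estado_actual1 == -1:
--         return ESTADO_TRAMPA
--     if estado_actual1 in estados_finaless:
--         return ESTADO_FINAL
--     else:
--         return ESTADO_NO_FINAL
--
-- def automata_entonces(cadena):
--
--     estado_actual = 0
--     estados_finales = [8]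
--
--     for caracter in cadena:
--         if estado_actual == 0 and caracter == "e":
--             estado_actual = 1
--         elif estado_actual == 1 and caracter == "n":
--             estado_actual = 2
--         elif estado_actual == 2 and caracter == "t":
--             estado_actual = 3
--         elif estado_actual == 3 and caracter == "o":
--             estado_actual = 4
--         elif estado_actual == 4 and caracter == "n":
--             estado_actual = 5
--         elif estado_actual == 5 and caracter == "c":
--             estado_actual = 6
--         elif estado_actual == 6 and caracter == "e":
--             estado_actual = 7
--         elif estado_actual == 7 and caracter == "s":
--             estado_actual = 8
--
--         else:
--             estado_actual = -1
--             break
--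
--     return condicion_cadena(estado_actual, estados_finales)
-- ===== SOURCE B (Python) =====
-- def automata_entonces(cadena):
--     target = "entonces"
--     if cadena == target:
--         return "ACEPTADO"
--     if target.startswith(cadena):
--         return "NO ACEPTADO"
--     return "TRAMPA"
-- ===== Notes on version B (the rewrite author's own statement) =====
-- stated objective: simpler
-- what changed: Replaced the 9-state per-character DFA loop with a closed-form comparison: exact match gives ACEPTADO, a proper prefix of 'entonces' gives NO ACEPTADO, anything else TRAMPA.
import Mathlib
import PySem

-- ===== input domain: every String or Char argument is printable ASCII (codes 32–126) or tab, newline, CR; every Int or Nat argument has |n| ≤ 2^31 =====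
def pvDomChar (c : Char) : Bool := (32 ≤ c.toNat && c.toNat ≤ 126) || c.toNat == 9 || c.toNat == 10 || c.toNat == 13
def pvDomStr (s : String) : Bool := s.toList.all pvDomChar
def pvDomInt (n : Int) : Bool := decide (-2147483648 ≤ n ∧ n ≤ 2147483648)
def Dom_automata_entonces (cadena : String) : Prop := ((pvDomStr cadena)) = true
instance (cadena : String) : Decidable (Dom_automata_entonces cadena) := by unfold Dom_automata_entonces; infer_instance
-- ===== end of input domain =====

-- B replaces A's per-character 9-state DFA loop by a closed-form comparison against the
-- literal "entonces" (equality / prefix test); objective: simpler.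

-- ===== PORT A =====
def condicion_cadena (estado_actual1 : Int) (estados_finaless : List Int) : String :=
  if estado_actual1 = -1 then "TRAMPA"
  else if estado_actual1 ∈ estados_finaless then "ACEPTADO"
  else "NO ACEPTADO"

-- the for-loop of A; in the 'else' branch estado_actual = -1 and the loop breaks
def automata_entonces_loop (estado_actual : Int) : List Char → Int
  | [] => estado_actual
  | caracter :: rest =>
    if estado_actual = 0 ∧ caracter = 'e' then automata_entonces_loop 1 rest
    else if estado_actual = 1 ∧ caracter = 'n' then automata_entonces_loop 2 rest
    else if estado_actual = 2 ∧ caracter = 't' then automata_entonces_loop 3 rest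
    else if estado_actual = 3 ∧ caracter = 'o' then automata_entonces_loop 4 rest
    else if estado_actual = 4 ∧ caracter = 'n' then automata_entonces_loop 5 rest
    else if estado_actual = 5 ∧ caracter = 'c' then automata_entonces_loop 6 rest
    else if estado_actual = 6 ∧ caracter = 'e' then automata_entonces_loop 7 rest
    else if estado_actual = 7 ∧ caracter = 's' then automata_entonces_loop 8 rest
    else (-1)

def automata_entonces (cadena : String) : String :=
  condicion_cadena (automata_entonces_loop 0 cadena.toList) [8]

-- ===== PORT B =====
def automata_entonces_alt (cadena : String) : String :=
  if cadena = "entonces" then "ACEPTADO"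
  else if PySem.Str.startswith "entonces" cadena then "NO ACEPTADO"
  else "TRAMPA"

-- ===== PRECONDITION & SPEC =====
def Spec_automata_entonces (cadena : String) (out : String) : Prop := out = automata_entonces_alt cadena
instance (cadena : String) (out : String) : Decidable (Spec_automata_entonces cadena out) := by unfold Spec_automata_entonces; infer_instance

-- ===== CLAIM (what is proved, stated in full; the proofs are below) =====
def Claim_equal_automata_entonces : Prop := ∀ (cadena : String), Dom_automata_entonces cadena → Spec_automata_entonces cadena (automata_entonces cadena)

-- ===== LEMMAS AND PROOFS =====

-- started in state k, A's loop checks that the string matches the k-th suffix of "entonces"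
set_option maxHeartbeats 3000000 in
theorem automata_entonces_loop_eq (l : List Char) : ∀ (k : Int), 0 ≤ k → k ≤ 8 →
    automata_entonces_loop k l =
      if l <+: ("entonces".toList.drop k.toNat) then k + l.length else -1 := by
  induction l with
  | nil => intro k _ _; simp [automata_entonces_loop]
  | cons c rest ih =>
    intro k hk0 hk8
    interval_cases k <;> simp only [automata_entonces_loop] <;>
      split_ifs with h1 h2 h3 h4 h5 h6 h7 h8 <;>
      simp_all [ih 1 (by norm_num) (by norm_num), ih 2 (by norm_num) (by norm_num),
        ih 3 (by norm_num) (by norm_num), ih 4 (by norm_num) (by norm_num),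
        ih 5 (by norm_num) (by norm_num), ih 6 (by norm_num) (by norm_num),
        ih 7 (by norm_num) (by norm_num), ih 8 (by norm_num) (by norm_num),
        List.cons_prefix_cons] <;> try omega

theorem automata_entonces_spec : Claim_equal_automata_entonces := by
  intro cadena _
  unfold Spec_automata_entonces automata_entonces automata_entonces_alt condicion_cadena
  have h := automata_entonces_loop_eq cadena.toList 0 (by omega) (by omega)
  simp only [Int.toNat_zero, List.drop_zero, zero_add] at h
  rw [h]
  have hsw : PySem.Str.startswith "entonces" cadena = true ↔ cadena.toList <+: "entonces".toList := by
    simp [PySem.Str.startswith_eq, PySem.Chars.startswith_iff]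
  have heq : cadena = "entonces" ↔ cadena.toList = "entonces".toList := by
    constructor
    · intro h; rw [h]
    · intro h; exact String.toList_inj.mp h
  by_cases hp : cadena.toList <+: "entonces".toList
  · have hlen : cadena.toList.length ≤ 8 := by
      have := hp.length_le; simpa using this
    by_cases h8 : cadena.toList.length = 8
    · have : cadena.toList = "entonces".toList :=
        List.IsPrefix.eq_of_length hp (by simp [h8])
      have h8' : (cadena.toList.length : Int) = 8 := by exact_mod_cast h8
      have hm1 : ¬ (cadena.toList.length : Int) = -1 := by omega
      rw [if_pos hp, if_neg hm1, if_pos (List.mem_singleton.mpr h8'),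
        if_pos (heq.mpr this)]
    · have hne : ¬ cadena = "entonces" := by
        intro he; apply h8; rw [he]; rfl
      have h8' : (cadena.toList.length : Int) ≠ 8 := by
        exact_mod_cast (show cadena.toList.length ≠ 8 from h8)
      have hm1 : ¬ (cadena.toList.length : Int) = -1 := by omega
      rw [if_pos hp, if_neg hm1, if_neg (fun hx => h8' (List.mem_singleton.mp hx)),
        if_neg hne, if_pos (hsw.mpr hp)]
  · have hne : ¬ cadena = "entonces" := by
      intro he; apply hp; rw [he]
    have hsw' : ¬ PySem.Str.startswith "entonces" cadena = true := fun hx => hp (hsw.mp hx)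
    rw [if_neg hp, if_neg hne, if_neg hsw']
    simp
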